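-- pv_equiv track=rewrite | github.com/jeffrichley/pytest-drill-sergeant | src/pytest_drill_sergeant/validators/aaa.py | _is_out_of_order
-- ===== SOURCE A (Python) =====
-- SECTION_ORDER = {"arrange": 0, "act": 1, "assert": 2}
--
-- def _is_out_of_order(section_sequence: list[str]) -> bool:
--     """Check if AAA sections violate Arrange -> Act -> Assert order."""
--     max_order_seen = -1
--     for section in section_sequence:
--         section_order = SECTION_ORDER.get(section, -1)
--         if section_order < max_order_seen:
--             return True
--         max_order_seen = max(max_order_seen, section_order)
--     return False
-- ===== SOURCE B (Python) =====
-- SECTION_ORDER = {"arrange": 0, "act": 1, "assert": 2}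
--
-- def _is_out_of_order(section_sequence: list[str]) -> bool:
--     orders = [SECTION_ORDER.get(s, -1) for s in section_sequence]
--     return any(a > b for a, b in zip(orders, orders[1:]))
-- ===== Notes on version B (the rewrite author's own statement) =====
-- stated objective: simpler
-- what changed: Replaces the running-maximum accumulator with an early return by mapping sections to order numbers once and checking for an adjacent strict descent with zip; correct because an element below the prefix maximum exists iff the order list has an adjacent descent.
import Mathlib
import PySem

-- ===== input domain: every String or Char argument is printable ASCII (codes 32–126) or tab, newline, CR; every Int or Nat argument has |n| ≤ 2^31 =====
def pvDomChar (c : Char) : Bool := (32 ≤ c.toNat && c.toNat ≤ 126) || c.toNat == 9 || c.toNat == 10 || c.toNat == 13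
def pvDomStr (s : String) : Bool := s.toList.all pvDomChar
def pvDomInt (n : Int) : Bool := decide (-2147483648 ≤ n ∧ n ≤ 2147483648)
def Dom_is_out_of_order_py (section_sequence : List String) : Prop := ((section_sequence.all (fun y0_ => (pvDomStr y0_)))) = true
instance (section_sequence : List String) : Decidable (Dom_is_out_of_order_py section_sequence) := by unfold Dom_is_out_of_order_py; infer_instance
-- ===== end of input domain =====

-- B maps sections to order numbers once and checks for an adjacent strict descent (simpler: no running max / early return).
-- ===== PORT A =====
def SECTION_ORDER_py : PySem.Dict String Int :=
  PySem.Dict.ofList [("arrange", 0), ("act", 1), ("assert", 2)]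

-- the for-loop of A with its early return, carrying max_order_seen
def isOutAuxA (max_order_seen : Int) : List String → Bool
  | [] => false
  | sect :: rest =>
    let section_order := SECTION_ORDER_py.getD sect (-1)
    if section_order < max_order_seen then true
    else isOutAuxA (max max_order_seen section_order) rest

def is_out_of_order_py (section_sequence : List String) : Bool :=
  isOutAuxA (-1) section_sequence

-- ===== PORT B =====
def is_out_of_order_py_alt (section_sequence : List String) : Bool :=
  let orders := section_sequence.map (fun s => SECTION_ORDER_py.getD s (-1))
  (orders.zip orders.tail).any (fun p => p.1 > p.2)

-- ===== PRECONDITION & SPEC =====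
def Spec_is_out_of_order_py (section_sequence : List String) (out : Bool) : Prop := out = is_out_of_order_py_alt section_sequence
instance (section_sequence : List String) (out : Bool) : Decidable (Spec_is_out_of_order_py section_sequence out) := by unfold Spec_is_out_of_order_py; infer_instance

-- ===== CLAIM (what is proved, stated in full; the proofs are below) =====
def Claim_equal_is_out_of_order_py : Prop := ∀ (section_sequence : List String), Dom_is_out_of_order_py section_sequence → Spec_is_out_of_order_py section_sequence (is_out_of_order_py section_sequence)

-- ===== LEMMAS AND PROOFS =====

-- ===== VERDICT (by name: the statement is the Claim_ definition above) =====
-- adjacent-descent test on an Int list (the body of B after the map)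
def descInt (l : List Int) : Bool := (l.zip l.tail).any (fun p => p.1 > p.2)

lemma ord_ge_neg_one (s : String) : -1 ≤ SECTION_ORDER_py.getD s (-1) := by
  have h : SECTION_ORDER_py = PySem.Dict.mk [("arrange", 0), ("act", 1), ("assert", 2)] := by
    decide
  simp only [h, PySem.Dict.getD_eq_get?_getD, PySem.Dict.get?_mk_cons]
  repeat' split
  all_goals simp [PySem.Dict.get?]

lemma isOutAuxA_eq_descInt (ss : List String) : ∀ m : Int,
    isOutAuxA m ss = descInt (m :: ss.map (fun s => SECTION_ORDER_py.getD s (-1))) := by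
  induction ss with
  | nil => intro m; rfl
  | cons s t ih =>
    intro m
    simp only [isOutAuxA, List.map_cons, descInt, List.tail_cons, List.zip_cons_cons,
      List.any_cons]
    by_cases h : SECTION_ORDER_py.getD s (-1) < m
    · simp [h]
    · have hm : max m (SECTION_ORDER_py.getD s (-1)) = SECTION_ORDER_py.getD s (-1) := by omega
      rw [if_neg h, ih, hm]
      simp only [descInt]
      have : ¬ (m > SECTION_ORDER_py.getD s (-1)) := by omega
      simp [this]

theorem is_out_of_order_py_spec : Claim_equal_is_out_of_order_py := by
  intro ss _
  unfold Spec_is_out_of_order_py is_out_of_order_py is_out_of_order_py_alt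
  rw [isOutAuxA_eq_descInt]
  cases ss with
  | nil => rfl
  | cons s t =>
    simp only [List.map_cons, descInt, List.tail_cons, List.zip_cons_cons, List.any_cons]
    have := ord_ge_neg_one s
    have h : ¬ ((-1 : Int) > SECTION_ORDER_py.getD s (-1)) := by omega
    simp [h]
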